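-- pv_equiv track=rewrite | github.com/fuzz4all/fuzz4all | Fuzz4All/target/SMT/SMT.py | _check_sat
-- ===== SOURCE A (Python) =====
-- def _check_sat(stdout):
--     sat = ""
--     for x in stdout.splitlines():
--         if "an invalid model was generated" in x.strip():
--             sat = "invalid model"
--             return sat
--
--     for x in stdout.splitlines():
--         if x.strip() == "unknown" or x.strip() == "unsupported":
--             sat = "unknown"
--             return sat
--
--     for x in stdout.splitlines():
--         if x.strip() == "unsat" or x.strip() == "sat":
--             sat = x.strip()
--             break
--     return sat
-- ===== SOURCE B (Python) =====
-- def _check_sat(stdout):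
--     found_unknown = False
--     found_sat = ""
--     for line in stdout.splitlines():
--         t = line.strip()
--         if "an invalid model was generated" in t:
--             return "invalid model"
--         if t == "unknown" or t == "unsupported":
--             found_unknown = True
--         elif (t == "unsat" or t == "sat") and not found_sat:
--             found_sat = t
--     return "unknown" if found_unknown else found_sat
-- ===== Notes on version B (the rewrite author's own statement) =====
-- stated objective: simpler
-- what changed: Replaces A's three full passes over stdout.splitlines() with one single pass that records unknown/sat flags and early-returns only on the invalid-model line.
import Mathlib
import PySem

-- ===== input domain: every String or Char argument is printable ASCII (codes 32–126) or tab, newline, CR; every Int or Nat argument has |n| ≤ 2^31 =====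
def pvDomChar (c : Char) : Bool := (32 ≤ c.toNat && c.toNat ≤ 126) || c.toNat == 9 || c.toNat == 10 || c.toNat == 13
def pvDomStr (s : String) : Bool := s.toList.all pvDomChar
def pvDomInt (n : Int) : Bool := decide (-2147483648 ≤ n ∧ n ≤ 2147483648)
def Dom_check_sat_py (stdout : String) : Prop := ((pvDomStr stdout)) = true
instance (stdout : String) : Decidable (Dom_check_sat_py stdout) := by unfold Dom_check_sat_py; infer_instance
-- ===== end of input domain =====

-- B makes one pass over the lines (recording flags, early-returning only on the
-- invalid-model line) instead of A's three separate passes; return value only, no claim beyond equality on Dom.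

-- ===== PORT A =====
-- first loop: early return "invalid model" on a matching line
def pvLoop1 : List String → Bool
  | [] => false
  | x :: r =>
    if PySem.Str.isIn "an invalid model was generated" (PySem.Str.strip x) then true
    else pvLoop1 r

-- second loop: early return "unknown"
def pvLoop2 : List String → Bool
  | [] => false
  | x :: r =>
    if PySem.Str.strip x == "unknown" || PySem.Str.strip x == "unsupported" then true
    else pvLoop2 r

-- third loop: sat = x.strip(); break
def pvLoop3 : List String → String
  | [] => ""
  | x :: r =>
    if PySem.Str.strip x == "unsat" || PySem.Str.strip x == "sat" then PySem.Str.strip x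
    else pvLoop3 r

def check_sat_py (stdout : String) : String :=
  let ls := PySem.Str.splitlines stdout
  if pvLoop1 ls then "invalid model"
  else if pvLoop2 ls then "unknown"
  else pvLoop3 ls

-- ===== PORT B =====
-- single pass with accumulators found_unknown / found_sat
def pvLoopB : List String → Bool → String → String
  | [], fu, fs => if fu then "unknown" else fs
  | x :: r, fu, fs =>
    let t := PySem.Str.strip x
    if PySem.Str.isIn "an invalid model was generated" t then "invalid model"
    else if t == "unknown" || t == "unsupported" then pvLoopB r true fs
    else if (t == "unsat" || t == "sat") && fs == "" then pvLoopB r fu t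
    else pvLoopB r fu fs

def check_sat_py_alt (stdout : String) : String :=
  pvLoopB (PySem.Str.splitlines stdout) false ""

-- ===== PRECONDITION & SPEC =====
def Spec_check_sat_py (stdout : String) (out : String) : Prop := out = check_sat_py_alt stdout
instance (stdout : String) (out : String) : Decidable (Spec_check_sat_py stdout out) := by unfold Spec_check_sat_py; infer_instance

-- ===== CLAIM (what is proved, stated in full; the proofs are below) =====
def Claim_equal_check_sat_py : Prop := ∀ (stdout : String), Dom_check_sat_py stdout → Spec_check_sat_py stdout (check_sat_py stdout)

-- ===== LEMMAS AND PROOFS =====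

-- B's single pass, with arbitrary accumulators, computes A's three-pass result.
lemma pvLoopB_eq (ls : List String) : ∀ (fu : Bool) (fs : String),
    pvLoopB ls fu fs =
      if pvLoop1 ls then "invalid model"
      else if fu || pvLoop2 ls then "unknown"
      else if fs == "" then pvLoop3 ls else fs := by
  induction ls with
  | nil =>
    intro fu fs
    simp only [pvLoopB, pvLoop1, pvLoop2, pvLoop3, Bool.or_false, if_false, Bool.false_eq_true,
      ite_false]
    cases fu
    · simp only [Bool.false_eq_true, if_false, ite_false]
      by_cases h : fs = "" <;> simp [h]
    · simp
  | cons x r ih =>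
    intro fu fs
    cases h1 : PySem.Str.isIn "an invalid model was generated" (PySem.Str.strip x) with
    | true => simp only [pvLoopB, pvLoop1, h1, if_true, ite_true]
    | false =>
      cases h2 : (PySem.Str.strip x == "unknown" || PySem.Str.strip x == "unsupported") with
      | true =>
        simp only [pvLoopB, pvLoop1, pvLoop2, h1, h2, ih, Bool.true_or, Bool.or_true,
          Bool.false_eq_true, if_false, if_true, ite_true, ite_false]
      | false =>
        cases h3 : ((PySem.Str.strip x == "unsat" || PySem.Str.strip x == "sat") && fs == "") with
        | true =>
          have hsat : (PySem.Str.strip x == "unsat" || PySem.Str.strip x == "sat") = true :=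
            (Bool.and_eq_true _ _ ▸ h3).1
          have hfs : fs = "" := by
            have := (Bool.and_eq_true _ _ ▸ h3).2
            simpa using this
          have hne : (PySem.Str.strip x == "") = false := by
            cases he : (PySem.Str.strip x == "")
            · rfl
            · rw [beq_iff_eq] at he
              rw [he] at hsat
              simp at hsat
          simp only [pvLoopB, pvLoop1, pvLoop2, pvLoop3, h1, h2, h3, ih, hsat, hfs, hne,
            Bool.false_eq_true, if_false, if_true, ite_true, ite_false, Bool.false_or,
            beq_self_eq_true, Bool.and_self]
        | false =>
          simp only [pvLoopB, pvLoop1, pvLoop2, pvLoop3, h1, h2, h3, Bool.false_eq_true,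
            if_false, ite_false]
          rw [ih]
          by_cases hfs : fs = ""
          · have hns : (PySem.Str.strip x == "unsat" || PySem.Str.strip x == "sat") = false := by
              cases hq : (PySem.Str.strip x == "unsat" || PySem.Str.strip x == "sat")
              · rfl
              · rw [hfs] at h3
                simp [hq] at h3
            simp [hfs, hns]
          · simp [hfs]

-- ===== VERDICT (by name: the statement is the Claim_ definition above) =====
theorem check_sat_py_spec : Claim_equal_check_sat_py := by
  intro stdout _
  unfold Spec_check_sat_py check_sat_py check_sat_py_alt
  rw [pvLoopB_eq]
  simp
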